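-- pv_equiv track=rewrite | github.com/overzerron/ProjetPython | library.py | ipToBinary
-- ===== SOURCE A (Python) =====
-- def ipToBinary(w,x,y,z):
--     mskBin = []
--     for msk in [w,x,y,z]:
--         listMsk = []
--         for i in range(8):
--             listMsk.append(msk%2)
--             msk = msk // 2
--         listMsk.reverse()
--         mskBin += listMsk
--     return mskBin
-- ===== SOURCE B (Python) =====
-- def ipToBinary(w, x, y, z):
--     # Direct MSB-first bit extraction: no mutation, no reverse, one flat comprehension.
--     return [(b >> s) & 1 for b in (w, x, y, z) for s in range(7, -1, -1)]
-- ===== Notes on version B (the rewrite author's own statement) =====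
-- stated objective: simpler
-- what changed: Replaces the LSB-first divide-by-2 loop with list mutation, reverse and concatenation by a single flat comprehension that reads each bit MSB-first with an arithmetic shift and mask.
import Mathlib
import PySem

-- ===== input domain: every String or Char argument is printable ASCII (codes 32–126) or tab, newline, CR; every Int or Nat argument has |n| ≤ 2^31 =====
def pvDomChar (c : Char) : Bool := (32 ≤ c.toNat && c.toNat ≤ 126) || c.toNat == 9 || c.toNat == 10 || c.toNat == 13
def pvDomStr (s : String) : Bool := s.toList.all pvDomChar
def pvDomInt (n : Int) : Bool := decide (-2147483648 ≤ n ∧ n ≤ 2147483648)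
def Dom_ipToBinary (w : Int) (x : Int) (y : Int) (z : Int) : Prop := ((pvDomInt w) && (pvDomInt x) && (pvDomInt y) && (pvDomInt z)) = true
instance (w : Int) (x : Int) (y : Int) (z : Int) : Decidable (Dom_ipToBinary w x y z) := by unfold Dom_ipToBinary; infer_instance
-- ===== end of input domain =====

-- B replaces the LSB-first %2,//2 loop + reverse + concat by one flat MSB-first
-- shift-and-mask comprehension (objective: simpler; same cost).
-- ===== PORT A =====
def ipToBinary (w : Int) (x : Int) (y : Int) (z : Int) : List Int :=
  [w, x, y, z].foldl
    (fun mskBin msk0 =>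
      -- inner loop: for i in range(8): listMsk.append(msk % 2); msk = msk // 2
      let st := (PySem.List.pyRange 0 8 1).foldl
        (fun (st : List Int × Int) _ =>
          (st.1 ++ [PySem.Int.mod st.2 2], PySem.Int.floordiv st.2 2))
        ([], msk0)
      mskBin ++ st.1.reverse)
    []

-- ===== PORT B =====
-- Python's 'b >> s' on ints is Lean's '>>>' (arithmetic shift, exact also on
-- negatives; s comes from range(7,-1,-1), always nonnegative, so s.toNat is exact)
-- and 'v & 1' is PySem.Int.band v 1 (exact).
def ipToBinary_alt (w : Int) (x : Int) (y : Int) (z : Int) : List Int :=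
  [w, x, y, z].flatMap
    (fun b => (PySem.List.pyRange 7 (-1) (-1)).map
      (fun s => PySem.Int.band (b >>> s.toNat) 1))

-- ===== PRECONDITION & SPEC =====
def Spec_ipToBinary (w : Int) (x : Int) (y : Int) (z : Int) (out : List Int) : Prop := out = ipToBinary_alt w x y z
instance (w : Int) (x : Int) (y : Int) (z : Int) (out : List Int) : Decidable (Spec_ipToBinary w x y z out) := by unfold Spec_ipToBinary; infer_instance

-- ===== CLAIM (what is proved, stated in full; the proofs are below) =====
def Claim_equal_ipToBinary : Prop := ∀ (w : Int) (x : Int) (y : Int) (z : Int), Dom_ipToBinary w x y z → Spec_ipToBinary w x y z (ipToBinary w x y z)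

-- ===== LEMMAS AND PROOFS =====

-- m >>> 1 is Python's m // 2 (floor), also for negative m
theorem pvShr1 (m : Int) : m >>> (1:Nat) = PySem.Int.floordiv m 2 := by
  rw [PySem.Int.floordiv_eq_ediv_of_pos (b := 2) (by norm_num)]
  cases m with
  | ofNat a =>
    show Int.ofNat (a >>> 1) = _
    rw [Nat.shiftRight_eq_div_pow]
    simp only [pow_one, Int.ofNat_eq_natCast]
    omega
  | negSucc a =>
    show Int.negSucc (a >>> 1) = _
    rw [Nat.shiftRight_eq_div_pow]
    simp only [pow_one, Int.negSucc_eq]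
    omega

theorem pvShrSucc (m : Int) (k : Nat) : m >>> (k+1) = (m >>> k) >>> (1:Nat) := by
  cases m <;> rfl

theorem pvShr0 (m : Int) : m >>> (0:Nat) = m := by cases m <;> rfl

-- the Int-by-Int shift (with a cast shift count) is the Int-by-Nat shift
theorem pvShrCast (m : Int) (k : Nat) : m >>> ((k:Nat):Int) = m >>> k := by
  cases m <;> cases k <;> rfl

-- peel one halving off the front of a right shift
theorem pvShrSucc' (m : Int) (k : Nat) :
    m >>> (k+1) = (PySem.Int.floordiv m 2) >>> k := by
  induction k generalizing m with
  | zero => simpa [pvShr0] using pvShr1 m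
  | succ k ih => rw [pvShrSucc m (k+1), ih, ← pvShrSucc]

-- the inner byte loop of A (8 × append-bit-and-halve, then reverse)
-- equals B's MSB-first shift-and-mask extraction
theorem pvByteEq (m : Int) :
    (((PySem.List.pyRange 0 8 1).foldl
        (fun (st : List Int × Int) _ =>
          (st.1 ++ [PySem.Int.mod st.2 2], PySem.Int.floordiv st.2 2))
        ([], m)).1).reverse
      = (PySem.List.pyRange 7 (-1) (-1)).map
          (fun s => PySem.Int.band (m >>> s.toNat) 1) := by
  have hr1 : PySem.List.pyRange 0 8 1 = [0,1,2,3,4,5,6,7] := by decide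
  have hr2 : PySem.List.pyRange 7 (-1) (-1) = [7,6,5,4,3,2,1,0] := by decide
  have ht : ((7:Int).toNat = 7) ∧ ((6:Int).toNat = 6) ∧ ((5:Int).toNat = 5) ∧ ((4:Int).toNat = 4)
      ∧ ((3:Int).toNat = 3) ∧ ((2:Int).toNat = 2) ∧ ((1:Int).toNat = 1) ∧ ((0:Int).toNat = 0) := by decide
  obtain ⟨ht7, ht6, ht5, ht4, ht3, ht2, ht1, ht0⟩ := ht
  have e7 : ∀ m : Int, m >>> (7:Nat) = (PySem.Int.floordiv m 2) >>> (6:Nat) := fun m => pvShrSucc' m 6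
  have e6 : ∀ m : Int, m >>> (6:Nat) = (PySem.Int.floordiv m 2) >>> (5:Nat) := fun m => pvShrSucc' m 5
  have e5 : ∀ m : Int, m >>> (5:Nat) = (PySem.Int.floordiv m 2) >>> (4:Nat) := fun m => pvShrSucc' m 4
  have e4 : ∀ m : Int, m >>> (4:Nat) = (PySem.Int.floordiv m 2) >>> (3:Nat) := fun m => pvShrSucc' m 3
  have e3 : ∀ m : Int, m >>> (3:Nat) = (PySem.Int.floordiv m 2) >>> (2:Nat) := fun m => pvShrSucc' m 2
  have e2 : ∀ m : Int, m >>> (2:Nat) = (PySem.Int.floordiv m 2) >>> (1:Nat) := fun m => pvShrSucc' m 1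
  rw [hr1, hr2]
  simp only [List.foldl, List.map, List.reverse, List.reverseAux,
    ht7, ht6, ht5, ht4, ht3, ht2, ht1, ht0, pvShrCast,
    List.cons_append, List.nil_append,
    e7, e6, e5, e4, e3, e2, pvShr1, pvShr0, PySem.Int.band_one]

-- ===== VERDICT (by name: the statement is the Claim_ definition above) =====
theorem ipToBinary_spec : Claim_equal_ipToBinary := by
  intro w x y z _
  unfold Spec_ipToBinary ipToBinary ipToBinary_alt
  simp only [List.foldl_cons, List.foldl_nil, List.flatMap_cons, List.flatMap_nil,
    List.append_nil, List.nil_append, List.append_assoc]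
  rw [pvByteEq, pvByteEq, pvByteEq, pvByteEq]
  simp only [pvShrCast]
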